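-- pv_equiv track=rewrite | github.com/NickIsAlive/TradingBot | trading.py | get_symbol_market
-- ===== SOURCE A (Python) =====
-- def get_symbol_market(symbol: str) -> str:
--     """
--     Determine the market for a given stock symbol.
--
--     Args:
--         symbol (str): Stock symbol
--
--     Returns:
--         str: Market name (e.g., 'NYSE', 'NASDAQ')
--     """
--     # Market-specific symbol mappings
--     market_mappings = {
--         'NYSE': lambda s: not s.endswith('.L') and not s.endswith('.AX'),
--         'NASDAQ': lambda s: not s.endswith('.L') and not s.endswith('.AX'),
--         'LSE': lambda s: s.endswith('.L'),
--         'ASX': lambda s: s.endswith('.AX')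
--     }
--
--     # Default to NYSE if no specific mapping matches
--     for market, check_func in market_mappings.items():
--         if check_func(symbol):
--             return market
--
--     return 'NYSE'  # Default fallback
-- ===== SOURCE B (Python) =====
-- def get_symbol_market(symbol: str) -> str:
--     if symbol.endswith('.L'):
--         return 'LSE'
--     if symbol.endswith('.AX'):
--         return 'ASX'
--     return 'NYSE'
-- ===== Notes on version B (the rewrite author's own statement) =====
-- stated objective: simpler
-- what changed: Replaced the dict of lambda predicates and its dispatch loop (with an unreachable NASDAQ entry and a dead fallback) by a direct if/elif chain on the two suffixes.
import Mathlib
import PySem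

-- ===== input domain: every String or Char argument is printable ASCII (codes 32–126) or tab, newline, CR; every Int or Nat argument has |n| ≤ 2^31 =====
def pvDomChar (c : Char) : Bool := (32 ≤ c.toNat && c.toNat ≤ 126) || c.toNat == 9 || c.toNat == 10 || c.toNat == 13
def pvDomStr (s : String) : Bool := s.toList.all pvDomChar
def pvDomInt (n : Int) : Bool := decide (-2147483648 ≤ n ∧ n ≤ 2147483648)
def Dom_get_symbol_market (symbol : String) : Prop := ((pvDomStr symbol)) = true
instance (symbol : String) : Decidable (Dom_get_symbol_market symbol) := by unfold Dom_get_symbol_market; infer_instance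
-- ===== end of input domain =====

-- B replaces the predicate-dict dispatch loop by a direct if/elif suffix chain (simpler; same result).


-- ===== PORT A =====
def pvLoopA (symbol : String) : List (String × (String → Bool)) → String
  | [] => "NYSE"  -- default fallback
  | (market, check_func) :: rest =>
      if check_func symbol then market else pvLoopA symbol rest

def get_symbol_market (symbol : String) : String :=
  let market_mappings : List (String × (String → Bool)) :=
    [("NYSE", fun s => !PySem.Str.endswith s ".L" && !PySem.Str.endswith s ".AX"),
     ("NASDAQ", fun s => !PySem.Str.endswith s ".L" && !PySem.Str.endswith s ".AX"),
     ("LSE", fun s => PySem.Str.endswith s ".L"),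
     ("ASX", fun s => PySem.Str.endswith s ".AX")]
  pvLoopA symbol market_mappings

-- ===== PORT B =====
def get_symbol_market_alt (symbol : String) : String :=
  if PySem.Str.endswith symbol ".L" then "LSE"
  else if PySem.Str.endswith symbol ".AX" then "ASX"
  else "NYSE"

-- ===== PRECONDITION & SPEC =====
def Spec_get_symbol_market (symbol : String) (out : String) : Prop := out = get_symbol_market_alt symbol
instance (symbol : String) (out : String) : Decidable (Spec_get_symbol_market symbol out) := by unfold Spec_get_symbol_market; infer_instance

-- ===== CLAIM (what is proved, stated in full; the proofs are below) =====
def Claim_equal_get_symbol_market : Prop := ∀ (symbol : String), Dom_get_symbol_market symbol → Spec_get_symbol_market symbol (get_symbol_market symbol)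

-- ===== LEMMAS AND PROOFS =====

-- ===== VERDICT (by name: the statement is the Claim_ definition above) =====
theorem get_symbol_market_spec : Claim_equal_get_symbol_market := by
  intro symbol _
  unfold Spec_get_symbol_market get_symbol_market get_symbol_market_alt
  simp only [pvLoopA]
  by_cases hL : PySem.Chars.endswith symbol.toList ['.', 'L'] = true <;>
    by_cases hAX : PySem.Chars.endswith symbol.toList ['.', 'A', 'X'] = true <;>
      simp [PySem.Str.endswith, hL, hAX]
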